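-- pv_equiv track=rewrite | github.com/HelenTang1/pyCodemap | pycodemap/graph.py | _has_alternate_path
-- ===== SOURCE A (Python) =====
-- from typing import Dict, Literal, Optional, Tuple, List, Set
--
-- def _has_alternate_path(
--     adj: Dict[str, Set[str]],
--     start: str,
--     target: str,
--     skip_edge: Tuple[str, str],
-- ) -> bool:
--     """
--     Return True if there exists a path from `start` to `target` that does NOT
--     use the edge `skip_edge`.
--     """
--     from collections import deque
--
--     visited: Set[str] = set()
--     queue: "deque[str]" = deque()
--     visited.add(start)
--     queue.append(start)
--
--     while queue:
--         u = queue.popleft()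
--         for w in adj.get(u, ()):
--             if (u, w) == skip_edge:
--                 continue
--             if w == target:
--                 return True
--             if w not in visited:
--                 visited.add(w)
--                 queue.append(w)
--
--     return False
-- ===== SOURCE B (Python) =====
-- from typing import Dict, Tuple, Set
--
-- def _has_alternate_path(
--     adj: Dict[str, Set[str]],
--     start: str,
--     target: str,
--     skip_edge: Tuple[str, str],
-- ) -> bool:
--     """
--     Alternative implementation: saturate the set of vertices reachable from
--     `start` without using `skip_edge` (and without passing through `target`)
--     by repeated relaxation passes until a fixpoint, then scan the out-edges
--     of the reachable set for a non-skipped edge into `target`.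
--     """
--     reach: Set[str] = {start}
--     changed = True
--     while changed:
--         changed = False
--         for u in list(reach):
--             for w in adj.get(u, ()):
--                 if (u, w) == skip_edge or w == target or w in reach:
--                     continue
--                 reach.add(w)
--                 changed = True
--     return any(
--         w == target and (u, w) != skip_edge
--         for u in reach
--         for w in adj.get(u, ())
--     )
-- ===== Notes on version B (the rewrite author's own statement) =====
-- stated objective: alternative
-- what changed: Replaces the BFS worklist (deque + early return during the traversal) by a fixpoint saturation: repeated relaxation passes grow the reachable set until no pass changes it, and only then a final scan over the out-edges of the reachable set looks for a non-skipped edge into target.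
import Mathlib
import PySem

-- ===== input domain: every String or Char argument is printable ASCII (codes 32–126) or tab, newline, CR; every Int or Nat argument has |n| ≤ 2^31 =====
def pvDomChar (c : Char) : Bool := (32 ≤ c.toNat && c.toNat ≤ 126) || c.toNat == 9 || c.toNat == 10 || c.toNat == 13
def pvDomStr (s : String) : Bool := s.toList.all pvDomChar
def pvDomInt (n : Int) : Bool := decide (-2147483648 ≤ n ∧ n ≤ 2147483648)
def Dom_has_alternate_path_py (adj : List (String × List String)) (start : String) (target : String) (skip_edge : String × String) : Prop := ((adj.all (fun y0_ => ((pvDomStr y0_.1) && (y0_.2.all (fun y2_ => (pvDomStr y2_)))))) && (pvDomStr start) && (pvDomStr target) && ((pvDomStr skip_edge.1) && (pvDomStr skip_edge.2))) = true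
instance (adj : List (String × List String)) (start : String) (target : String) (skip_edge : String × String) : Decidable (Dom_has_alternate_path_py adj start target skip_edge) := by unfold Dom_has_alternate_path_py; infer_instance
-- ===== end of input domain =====

-- B replaces A's BFS worklist by fixpoint-saturation relaxation passes plus a final edge scan; objective: alternative (not faster).

-- `adj.get(u, ())` : first-match association-list lookup (the dict convention), empty list when absent.
def pvNbrs (adj : List (String × List String)) (u : String) : List String :=
  (adj.lookup u).getD []

-- finite universe every visited/reachable vertex lives in (used only by the termination measures)
def pvUniv (adj : List (String × List String)) (st : String) : List String :=
  PySem.Set.ofList (st :: adj.flatMap (fun p => p.2))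

theorem pv_lookup_subset : ∀ (adj : List (String × List String)) (u : String) (l : List String),
    adj.lookup u = some l → ∀ x ∈ l, x ∈ adj.flatMap (fun p => p.2) := by
  intro adj
  induction adj with
  | nil => intro u l h; simp [List.lookup] at h
  | cons p ps ih =>
    intro u l h x hx
    simp only [List.lookup] at h
    by_cases hu : u == p.1
    · simp [hu] at h; subst h; simp [hx]
    · simp [hu] at h; simp [ih u l h x hx]

theorem pvNbrs_subset_univ (adj : List (String × List String)) (st : String) :
    ∀ (u w : String), w ∈ pvNbrs adj u → w ∈ pvUniv adj st := by
  intro u w hx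
  unfold pvNbrs at hx
  unfold pvUniv
  rw [PySem.Set.mem_ofList]
  cases hl : adj.lookup u with
  | none => simp [hl] at hx
  | some l =>
    simp only [hl, Option.getD_some] at hx
    simp [pv_lookup_subset adj u l hl w hx]

-- ===== PORT A =====
-- inner `for w in adj.get(u, ())` loop of A; `none` = the `return True` branch fired
def pvEdgeLoop (sk : String × String) (t u : String) :
    List String → List String → List String → Option (List String × List String)
  | [], vis, q => some (vis, q)
  | w :: ws, vis, q =>
    if (u, w) = sk then pvEdgeLoop sk t u ws vis q
    else if w = t then none
    else if w ∈ vis then pvEdgeLoop sk t u ws vis q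
    else pvEdgeLoop sk t u ws (PySem.Set.add vis w) (q ++ [w])

-- invariants of the inner loop that the BFS loop's termination measure needs
theorem pvEdgeLoop_inv (sk : String × String) (t u : String) :
    ∀ (ws vis q vis' q' : List String), pvEdgeLoop sk t u ws vis q = some (vis', q') →
      (vis.Nodup → vis'.Nodup) ∧ (∀ x ∈ vis', x ∈ vis ∨ x ∈ ws) ∧
      vis'.length + q.length = vis.length + q'.length ∧ vis.length ≤ vis'.length := by
  intro ws
  induction ws with
  | nil =>
    intro vis q vis' q' h
    simp [pvEdgeLoop] at h
    obtain ⟨h1, h2⟩ := h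
    subst h1; subst h2
    exact ⟨id, fun x hx => Or.inl hx, by omega, le_refl _⟩
  | cons w ws ih =>
    intro vis q vis' q' h
    simp only [pvEdgeLoop] at h
    split_ifs at h with h1 h2 h3
    · obtain ⟨a, b, c, d⟩ := ih vis q vis' q' h
      exact ⟨a, fun x hx => (b x hx).imp id (fun h' => List.mem_cons_of_mem _ h'), c, d⟩
    · obtain ⟨a, b, c, d⟩ := ih vis q vis' q' h
      exact ⟨a, fun x hx => (b x hx).imp id (fun h' => List.mem_cons_of_mem _ h'), c, d⟩
    · rw [PySem.Set.add_of_not_mem h3] at h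
      obtain ⟨a, b, c, d⟩ := ih _ _ vis' q' h
      refine ⟨?_, ?_, ?_, ?_⟩
      · intro hnd
        refine a ?_
        simp [List.nodup_append, hnd]
        exact fun x hx hc => h3 (hc ▸ hx)
      · intro x hx
        rcases b x hx with h' | h'
        · rcases List.mem_append.mp h' with h'' | h''
          · exact Or.inl h''
          · simp at h''; subst h''; simp
        · exact Or.inr (List.mem_cons_of_mem _ h')
      · simp at c; omega
      · simp at d; omega

-- the BFS `while queue:` loop of A (visited/queue state; the Nodup/universe
-- hypotheses are proof arguments used only for termination)
def pvBfs (adj : List (String × List String)) (sk : String × String) (t st : String)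
    (vis q : List String) (hnd : vis.Nodup) (hsub : ∀ x ∈ vis, x ∈ pvUniv adj st) : Bool :=
  match q with
  | [] => false
  | u :: qs =>
    match h : pvEdgeLoop sk t u (pvNbrs adj u) vis qs with
    | none => true
    | some (vis', q') =>
      pvBfs adj sk t st vis' q' ((pvEdgeLoop_inv sk t u _ vis qs vis' q' h).1 hnd)
        (fun x hx => ((pvEdgeLoop_inv sk t u _ vis qs vis' q' h).2.1 x hx).elim
          (fun h' => hsub x h') (fun h' => pvNbrs_subset_univ adj st u x h'))
termination_by (pvUniv adj st).length + 1 - vis.length + q.length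
decreasing_by
  obtain ⟨a, b, c, d⟩ := pvEdgeLoop_inv sk t u _ vis qs vis' q' h
  have h2 : vis'.length ≤ (pvUniv adj st).length := by
    refine List.Subperm.length_le (List.Nodup.subperm (a hnd) ?_)
    intro x hx
    rcases b x hx with h' | h'
    · exact hsub x h'
    · exact pvNbrs_subset_univ adj st u x h'
  simp only [List.length_cons]
  omega

def has_alternate_path_py (adj : List (String × List String)) (start : String) (target : String) (skip_edge : String × String) : Bool :=
  pvBfs adj skip_edge target start (PySem.Set.add PySem.Set.empty start) [start]
    (by simp [PySem.Set.add, PySem.Set.empty])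
    (by
      intro x hx
      simp [PySem.Set.add, PySem.Set.empty] at hx
      subst hx
      unfold pvUniv
      rw [PySem.Set.mem_ofList]
      simp)

-- ===== PORT B =====
-- inner `for w in adj.get(u, ()):` of a relaxation pass (r = reach, ch = changed flag)
def pvRelaxEdges (sk : String × String) (t u : String) :
    List String → List String → Bool → List String × Bool
  | [], r, ch => (r, ch)
  | w :: ws, r, ch =>
    if (u, w) = sk ∨ w = t ∨ w ∈ r then pvRelaxEdges sk t u ws r ch
    else pvRelaxEdges sk t u ws (PySem.Set.add r w) true

-- `for u in list(reach):` — us is what remains of the snapshot of reach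
def pvPassOuter (adj : List (String × List String)) (sk : String × String) (t : String) :
    List String → List String → Bool → List String × Bool
  | [], r, ch => (r, ch)
  | u :: us, r, ch =>
    match pvRelaxEdges sk t u (pvNbrs adj u) r ch with
    | (r', ch') => pvPassOuter adj sk t us r' ch'

-- invariants of one relaxation pass, needed by the saturation loop's termination measure;
-- the P-clause instantiates to membership in pvUniv
theorem pvRelaxEdges_inv (sk : String × String) (t u : String) (P : String → Prop) :
    ∀ (ws r : List String) (ch : Bool) (r' : List String) (ch' : Bool),
      pvRelaxEdges sk t u ws r ch = (r', ch') →
      (∀ x ∈ r, x ∈ r') ∧ (r.Nodup → r'.Nodup) ∧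
      ((∀ x ∈ r, P x) → (∀ x ∈ ws, P x) → ∀ x ∈ r', P x) ∧
      (ch' = false → r' = r ∧ ch = false) ∧ r.length ≤ r'.length ∧
      (ch = false → ch' = true → r.length < r'.length) := by
  intro ws
  induction ws with
  | nil =>
    intro r ch r' ch' h
    simp [pvRelaxEdges] at h
    obtain ⟨h1, h2⟩ := h
    subst h1; subst h2
    exact ⟨fun x hx => hx, id, fun hP _ => hP, fun h' => ⟨rfl, h'⟩, le_refl _,
      fun hc hc' => by simp [hc] at hc'⟩
  | cons w ws ih =>
    intro r ch r' ch' h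
    simp only [pvRelaxEdges] at h
    split_ifs at h with h1
    · obtain ⟨a, b, c, d, e, f⟩ := ih r ch r' ch' h
      exact ⟨a, b, fun hP hws => c hP (fun x hx => hws x (List.mem_cons_of_mem _ hx)), d, e, f⟩
    · push_neg at h1
      rw [PySem.Set.add_of_not_mem h1.2.2] at h
      obtain ⟨a, b, c, d, e, f⟩ := ih _ _ r' ch' h
      refine ⟨?_, ?_, ?_, ?_, ?_, ?_⟩
      · intro x hx; exact a x (by simp [hx])
      · intro hnd
        refine b ?_
        simp [List.nodup_append, hnd]
        exact fun x hx hc => h1.2.2 (hc ▸ hx)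
      · intro hP hws
        refine c ?_ (fun x hx => hws x (List.mem_cons_of_mem _ hx))
        intro x hx
        rcases List.mem_append.mp hx with h' | h'
        · exact hP x h'
        · simp at h'; subst h'; exact hws x List.mem_cons_self
      · intro h'
        rcases d h' with ⟨_, h''⟩
        simp at h''
      · simp at e; omega
      · intro _ _
        simp at e; omega

theorem pvPassOuter_inv (adj : List (String × List String)) (sk : String × String) (t : String)
    (P : String → Prop) (hP : ∀ u w, w ∈ pvNbrs adj u → P w) :
    ∀ (us r : List String) (ch : Bool) (r' : List String) (ch' : Bool),
      pvPassOuter adj sk t us r ch = (r', ch') →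
      (∀ x ∈ r, x ∈ r') ∧ (r.Nodup → r'.Nodup) ∧
      ((∀ x ∈ r, P x) → ∀ x ∈ r', P x) ∧
      (ch' = false → r' = r ∧ ch = false) ∧ r.length ≤ r'.length ∧
      (ch = false → ch' = true → r.length < r'.length) := by
  intro us
  induction us with
  | nil =>
    intro r ch r' ch' h
    simp [pvPassOuter] at h
    obtain ⟨h1, h2⟩ := h
    subst h1; subst h2
    exact ⟨fun x hx => hx, id, fun h => h, fun h' => ⟨rfl, h'⟩, le_refl _,
      fun hc hc' => by simp [hc] at hc'⟩
  | cons u us ih =>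
    intro r ch r' ch' h
    simp only [pvPassOuter] at h
    rcases hR : pvRelaxEdges sk t u (pvNbrs adj u) r ch with ⟨r₁, ch₁⟩
    rw [hR] at h
    obtain ⟨a1, b1, c1, d1, e1, f1⟩ := pvRelaxEdges_inv sk t u P (pvNbrs adj u) r ch r₁ ch₁ hR
    obtain ⟨a2, b2, c2, d2, e2, f2⟩ := ih r₁ ch₁ r' ch' h
    refine ⟨fun x hx => a2 x (a1 x hx), fun hnd => b2 (b1 hnd), ?_, ?_, by omega, ?_⟩
    · intro hr x hx
      exact c2 (c1 hr (fun w hw => hP u w hw)) x hx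
    · intro h'
      rcases d2 h' with ⟨h1', h2'⟩
      rcases d1 h2' with ⟨h3', h4'⟩
      exact ⟨h1'.trans h3', h4'⟩
    · intro hc hc'
      cases hch₁ : ch₁ with
      | true =>
        subst hch₁
        have := f1 hc rfl
        omega
      | false =>
        subst hch₁
        rcases d1 rfl with ⟨h3', _⟩
        have := f2 rfl hc'
        omega

-- the `while changed:` saturation loop of B
def pvSaturate (adj : List (String × List String)) (sk : String × String) (t st : String)
    (reach : List String) (hnd : reach.Nodup) (hsub : ∀ x ∈ reach, x ∈ pvUniv adj st) :
    List String :=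
  match h : pvPassOuter adj sk t reach reach false with
  | (r', false) => r'
  | (r', true) =>
    pvSaturate adj sk t st r'
      ((pvPassOuter_inv adj sk t (· ∈ pvUniv adj st) (pvNbrs_subset_univ adj st)
          reach reach false r' true h).2.1 hnd)
      (fun x hx => (pvPassOuter_inv adj sk t (· ∈ pvUniv adj st) (pvNbrs_subset_univ adj st)
          reach reach false r' true h).2.2.1 hsub x hx)
termination_by (pvUniv adj st).length + 1 - reach.length
decreasing_by
  obtain ⟨a, b, c, d, e, f⟩ := pvPassOuter_inv adj sk t (· ∈ pvUniv adj st)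
    (pvNbrs_subset_univ adj st) reach reach false r' true h
  have h2 : r'.length ≤ (pvUniv adj st).length :=
    List.Subperm.length_le (List.Nodup.subperm (b hnd) (fun x hx => c hsub x hx))
  have := f rfl rfl
  omega

-- final `any(w == target and (u, w) != skip_edge for u in reach for w in adj.get(u, ()))`
def pvHasTargetEdge (adj : List (String × List String)) (sk : String × String) (t : String)
    (r : List String) : Bool :=
  r.any (fun u => (pvNbrs adj u).any (fun w => w == t && !(decide ((u, w) = sk))))

theorem pvStart_mem_univ (adj : List (String × List String)) (st : String) :
    ∀ x ∈ PySem.Set.ofList [st], x ∈ pvUniv adj st := by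
  intro x hx
  rw [PySem.Set.mem_ofList] at hx
  simp at hx
  subst hx
  unfold pvUniv
  rw [PySem.Set.mem_ofList]
  simp

def has_alternate_path_py_alt (adj : List (String × List String)) (start : String) (target : String) (skip_edge : String × String) : Bool :=
  pvHasTargetEdge adj skip_edge target
    (pvSaturate adj skip_edge target start (PySem.Set.ofList [start])
      (PySem.Set.nodup_ofList _) (pvStart_mem_univ adj start))

-- ===== PRECONDITION & SPEC =====
def Spec_has_alternate_path_py (adj : List (String × List String)) (start : String) (target : String) (skip_edge : String × String) (out : Bool) : Prop := out = has_alternate_path_py_alt adj start target skip_edge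
instance (adj : List (String × List String)) (start : String) (target : String) (skip_edge : String × String) (out : Bool) : Decidable (Spec_has_alternate_path_py adj start target skip_edge out) := by unfold Spec_has_alternate_path_py; infer_instance

-- ===== CLAIM (what is proved, stated in full; the proofs are below) =====
def Claim_equal_has_alternate_path_py : Prop := ∀ (adj : List (String × List String)) (start : String) (target : String) (skip_edge : String × String), Dom_has_alternate_path_py adj start target skip_edge → Spec_has_alternate_path_py adj start target skip_edge (has_alternate_path_py adj start target skip_edge)

-- ===== LEMMAS AND PROOFS =====

-- an edge of the graph that is not the skipped edge
def pvEdge (adj : List (String × List String)) (sk : String × String) (u w : String) : Prop :=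
  w ∈ pvNbrs adj u ∧ (u, w) ≠ sk

-- the vertices both loops visit: reachable from st via non-skipped edges, never entering t
inductive pvReach (adj : List (String × List String)) (sk : String × String) (t st : String) :
    String → Prop
  | base : pvReach adj sk t st st
  | step {u w : String} : pvReach adj sk t st u → pvEdge adj sk u w → w ≠ t →
      pvReach adj sk t st w

-- both programs return true exactly when some such vertex has a non-skipped edge into t
def pvHit (adj : List (String × List String)) (sk : String × String) (t st : String) : Prop :=
  ∃ u, pvReach adj sk t st u ∧ pvEdge adj sk u t

theorem pvHit_of_closed (adj : List (String × List String)) (sk : String × String) (t st : String)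
    (V : List String) (hst : st ∈ V)
    (hcl : ∀ u ∈ V, ∀ w, pvEdge adj sk u w → w ≠ t ∧ w ∈ V) :
    ¬ pvHit adj sk t st := by
  have hmem : ∀ y, pvReach adj sk t st y → y ∈ V := by
    intro y hy
    induction hy with
    | base => exact hst
    | step hu he hw ih => exact (hcl _ ih _ he).2
  rintro ⟨u, hu, he⟩
  exact (hcl u (hmem u hu) t he).1 rfl

theorem pvEdgeLoop_none (sk : String × String) (t u : String) :
    ∀ (ws vis q : List String), pvEdgeLoop sk t u ws vis q = none →
      t ∈ ws ∧ (u, t) ≠ sk := by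
  intro ws
  induction ws with
  | nil => intro vis q h; simp [pvEdgeLoop] at h
  | cons w ws ih =>
    intro vis q h
    simp only [pvEdgeLoop] at h
    split_ifs at h with h1 h2 h3
    · obtain ⟨a, b⟩ := ih vis q h
      exact ⟨List.mem_cons_of_mem _ a, b⟩
    · subst h2; exact ⟨List.mem_cons_self, fun hc => h1 hc⟩
    · obtain ⟨a, b⟩ := ih vis q h
      exact ⟨List.mem_cons_of_mem _ a, b⟩
    · obtain ⟨a, b⟩ := ih _ _ h
      exact ⟨List.mem_cons_of_mem _ a, b⟩

-- richer facts about the inner BFS loop, used by the equivalence proofs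
theorem pvEdgeLoop_some (sk : String × String) (t u : String) :
    ∀ (ws vis q vis' q' : List String), pvEdgeLoop sk t u ws vis q = some (vis', q') →
      (∀ x ∈ vis, x ∈ vis') ∧ (∀ x ∈ q, x ∈ q') ∧
      (∀ w ∈ ws, (u, w) ≠ sk → w ≠ t ∧ w ∈ vis') ∧
      (∀ x ∈ vis', x ∈ vis ∨ x ∈ q') ∧
      (∀ x ∈ q', x ∈ q ∨ x ∈ vis') ∧
      (∀ x ∈ vis', x ∈ vis ∨ ((u, x) ≠ sk ∧ x ≠ t ∧ x ∈ ws)) := by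
  intro ws
  induction ws with
  | nil =>
    intro vis q vis' q' h
    simp [pvEdgeLoop] at h
    obtain ⟨h1, h2⟩ := h
    subst h1; subst h2
    exact ⟨fun x hx => hx, fun x hx => hx, by simp, fun x hx => Or.inl hx,
      fun x hx => Or.inl hx, fun x hx => Or.inl hx⟩
  | cons w ws ih =>
    intro vis q vis' q' h
    simp only [pvEdgeLoop] at h
    split_ifs at h with h1 h2 h3
    · obtain ⟨a, b, c, d, e, f⟩ := ih vis q vis' q' h
      refine ⟨a, b, ?_, d, e, ?_⟩
      · intro x hx hne
        rcases List.mem_cons.mp hx with h' | h'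
        · subst h'; exact absurd h1 hne
        · exact c x h' hne
      · intro x hx
        exact (f x hx).imp id (fun hp => ⟨hp.1, hp.2.1, List.mem_cons_of_mem _ hp.2.2⟩)
    · obtain ⟨a, b, c, d, e, f⟩ := ih vis q vis' q' h
      refine ⟨a, b, ?_, d, e, ?_⟩
      · intro x hx hne
        rcases List.mem_cons.mp hx with h' | h'
        · subst h'; exact ⟨h2, a _ h3⟩
        · exact c x h' hne
      · intro x hx
        exact (f x hx).imp id (fun hp => ⟨hp.1, hp.2.1, List.mem_cons_of_mem _ hp.2.2⟩)
    · rw [PySem.Set.add_of_not_mem h3] at h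
      obtain ⟨a, b, c, d, e, f⟩ := ih _ _ vis' q' h
      have hwv : w ∈ vis' := a w (by simp)
      refine ⟨?_, ?_, ?_, ?_, ?_, ?_⟩
      · intro x hx; exact a x (by simp [hx])
      · intro x hx; exact b x (by simp [hx])
      · intro x hx hne
        rcases List.mem_cons.mp hx with h' | h'
        · subst h'; exact ⟨h2, hwv⟩
        · exact c x h' hne
      · intro x hx
        rcases d x hx with h' | h'
        · rcases List.mem_append.mp h' with h'' | h''
          · exact Or.inl h''
          · simp at h''; subst h''
            exact Or.inr (b x (by simp))
        · exact Or.inr h'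
      · intro x hx
        rcases e x hx with h' | h'
        · rcases List.mem_append.mp h' with h'' | h''
          · exact Or.inl h''
          · simp at h''; subst h''; exact Or.inr hwv
        · exact Or.inr h'
      · intro x hx
        rcases f x hx with h' | h'
        · rcases List.mem_append.mp h' with h'' | h''
          · exact Or.inl h''
          · simp at h''; subst h''
            exact Or.inr ⟨h1, h2, List.mem_cons_self⟩
        · exact Or.inr ⟨h'.1, h'.2.1, List.mem_cons_of_mem _ h'.2.2⟩

-- BFS soundness: returning true exhibits a hit
theorem pvBfs_true (adj : List (String × List String)) (sk : String × String) (t st : String) :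
    ∀ (vis q : List String) (hnd : vis.Nodup) (hsub : ∀ x ∈ vis, x ∈ pvUniv adj st),
      pvBfs adj sk t st vis q hnd hsub = true →
      (∀ x ∈ vis, pvReach adj sk t st x) → (∀ x ∈ q, x ∈ vis) →
      pvHit adj sk t st := by
  intro vis q hnd hsub
  induction vis, q, hnd, hsub using pvBfs.induct adj sk t st with
  | case1 vis hnd hsub =>
    intro h
    rw [pvBfs] at h
    simp at h
  | case2 vis hnd hsub u qs h =>
    intro _ hR hq
    have hu : pvReach adj sk t st u := hR u (hq u List.mem_cons_self)
    obtain ⟨a, b⟩ := pvEdgeLoop_none sk t u _ vis qs h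
    exact ⟨u, hu, a, b⟩
  | case3 vis hnd hsub u qs vis' q' h ih =>
    intro htrue hR hq
    have hunf : pvBfs adj sk t st vis (u :: qs) hnd hsub =
        pvBfs adj sk t st vis' q' ((pvEdgeLoop_inv sk t u _ vis qs vis' q' h).1 hnd)
          (fun x hx => ((pvEdgeLoop_inv sk t u _ vis qs vis' q' h).2.1 x hx).elim
            (fun h' => hsub x h') (fun h' => pvNbrs_subset_univ adj st u x h')) := by
      rw [pvBfs]
      split
      case _ heq => rw [h] at heq; cases heq
      case _ vis'' q'' heq =>
        rw [h] at heq
        injection heq with heq1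
        injection heq1 with h1 h2
        subst h1; subst h2
        rfl
    rw [hunf] at htrue
    obtain ⟨a, b, c, d, e, f⟩ := pvEdgeLoop_some sk t u _ vis qs vis' q' h
    have hu : pvReach adj sk t st u := hR u (hq u List.mem_cons_self)
    have hR' : ∀ x ∈ vis', pvReach adj sk t st x := by
      intro x hx
      rcases f x hx with h' | h'
      · exact hR x h'
      · exact pvReach.step hu ⟨h'.2.2, h'.1⟩ h'.2.1
    refine ih htrue hR' ?_
    intro x hx
    rcases e x hx with h' | h'
    · exact a x (hq x (List.mem_cons_of_mem _ h'))
    · exact h'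

-- BFS completeness: returning false yields a closed target-edge-free superset of visited
theorem pvBfs_false_closed (adj : List (String × List String)) (sk : String × String)
    (t st : String) :
    ∀ (vis q : List String) (hnd : vis.Nodup) (hsub : ∀ x ∈ vis, x ∈ pvUniv adj st),
      pvBfs adj sk t st vis q hnd hsub = false →
      (∀ u ∈ vis, u ∉ q → ∀ w, pvEdge adj sk u w → w ≠ t ∧ w ∈ vis) →
      (∀ x ∈ q, x ∈ vis) →
      ∃ V : List String, (∀ x ∈ vis, x ∈ V) ∧
        (∀ u ∈ V, ∀ w, pvEdge adj sk u w → w ≠ t ∧ w ∈ V) := by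
  intro vis q hnd hsub
  induction vis, q, hnd, hsub using pvBfs.induct adj sk t st with
  | case1 vis hnd hsub =>
    intro _ hcl _
    exact ⟨vis, fun x hx => hx, fun u hu w he => hcl u hu (by simp) w he⟩
  | case2 vis hnd hsub u qs h =>
    intro hfalse _ _
    have hunf : pvBfs adj sk t st vis (u :: qs) hnd hsub = true := by
      rw [pvBfs]
      split
      case _ => rfl
      case _ vis'' q'' heq => rw [h] at heq; cases heq
    rw [hunf] at hfalse
    simp at hfalse
  | case3 vis hnd hsub u qs vis' q' h ih =>
    intro hfalse hcl hq
    have hunf : pvBfs adj sk t st vis (u :: qs) hnd hsub =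
        pvBfs adj sk t st vis' q' ((pvEdgeLoop_inv sk t u _ vis qs vis' q' h).1 hnd)
          (fun x hx => ((pvEdgeLoop_inv sk t u _ vis qs vis' q' h).2.1 x hx).elim
            (fun h' => hsub x h') (fun h' => pvNbrs_subset_univ adj st u x h')) := by
      rw [pvBfs]
      split
      case _ heq => rw [h] at heq; cases heq
      case _ vis'' q'' heq =>
        rw [h] at heq
        injection heq with heq1
        injection heq1 with h1 h2
        subst h1; subst h2
        rfl
    rw [hunf] at hfalse
    obtain ⟨a, b, c, d, e, f⟩ := pvEdgeLoop_some sk t u _ vis qs vis' q' h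
    have hq'sub : ∀ x ∈ q', x ∈ vis' := by
      intro x hx
      rcases e x hx with h' | h'
      · exact a x (hq x (List.mem_cons_of_mem _ h'))
      · exact h'
    have hcl' : ∀ v ∈ vis', v ∉ q' → ∀ w, pvEdge adj sk v w → w ≠ t ∧ w ∈ vis' := by
      intro v hv hvq' w he
      rcases d v hv with hvvis | hvq
      · by_cases hvu : v = u
        · subst hvu
          exact c w he.1 he.2
        · by_cases hvqs : v ∈ qs
          · exact absurd (b v hvqs) hvq'
          · have hvnotq : v ∉ u :: qs := by
              intro hc
              rcases List.mem_cons.mp hc with h' | h'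
              · exact hvu h'
              · exact hvqs h'
            obtain ⟨p1, p2⟩ := hcl v hvvis hvnotq w he
            exact ⟨p1, a w p2⟩
      · exact absurd hvq hvq'
    obtain ⟨V, hV1, hV2⟩ := ih hfalse hcl' hq'sub
    exact ⟨V, fun x hx => hV1 x (a x hx), hV2⟩

theorem hasA_iff_hit (adj : List (String × List String)) (sk : String × String) (t st : String) :
    has_alternate_path_py adj st t sk = true ↔ pvHit adj sk t st := by
  constructor
  · intro h
    refine pvBfs_true adj sk t st _ _ _ _ h ?_ ?_
    · intro x hx
      simp [PySem.Set.add, PySem.Set.empty] at hx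
      subst hx
      exact pvReach.base
    · intro x hx
      simp at hx
      simp [PySem.Set.add, PySem.Set.empty, hx]
  · intro hhit
    by_contra hfalse
    rw [Bool.not_eq_true] at hfalse
    obtain ⟨V, hV1, hV2⟩ := pvBfs_false_closed adj sk t st _ _ _ _ hfalse
      (by
        intro u hu hnq
        simp [PySem.Set.add, PySem.Set.empty] at hu
        subst hu
        simp at hnq)
      (by
        intro x hx
        simp at hx
        simp [PySem.Set.add, PySem.Set.empty, hx])
    have hst : st ∈ V := hV1 st (by simp [PySem.Set.add, PySem.Set.empty])
    exact pvHit_of_closed adj sk t st V hst hV2 hhit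

-- saturation soundness: every vertex a pass adds is pvReach
theorem pvRelaxEdges_sound (adj : List (String × List String)) (sk : String × String)
    (t st u : String) (hu : pvReach adj sk t st u) :
    ∀ (ws r : List String) (ch : Bool) (r' : List String) (ch' : Bool),
      pvRelaxEdges sk t u ws r ch = (r', ch') →
      (∀ x ∈ ws, x ∈ pvNbrs adj u) →
      (∀ x ∈ r, pvReach adj sk t st x) → ∀ x ∈ r', pvReach adj sk t st x := by
  intro ws
  induction ws with
  | nil =>
    intro r ch r' ch' h _ hr
    simp [pvRelaxEdges] at h
    exact h.1 ▸ hr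
  | cons w ws ih =>
    intro r ch r' ch' h hws hr
    simp only [pvRelaxEdges] at h
    split_ifs at h with h1
    · exact ih r ch r' ch' h (fun x hx => hws x (List.mem_cons_of_mem _ hx)) hr
    · push_neg at h1
      rw [PySem.Set.add_of_not_mem h1.2.2] at h
      refine ih _ _ r' ch' h (fun x hx => hws x (List.mem_cons_of_mem _ hx)) ?_
      intro x hx
      rcases List.mem_append.mp hx with h' | h'
      · exact hr x h'
      · simp at h'; subst h'
        exact pvReach.step hu ⟨hws x List.mem_cons_self, h1.1⟩ h1.2.1

theorem pvPassOuter_sound (adj : List (String × List String)) (sk : String × String)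
    (t st : String) :
    ∀ (us r : List String) (ch : Bool) (r' : List String) (ch' : Bool),
      pvPassOuter adj sk t us r ch = (r', ch') →
      (∀ u ∈ us, pvReach adj sk t st u) →
      (∀ x ∈ r, pvReach adj sk t st x) → ∀ x ∈ r', pvReach adj sk t st x := by
  intro us
  induction us with
  | nil =>
    intro r ch r' ch' h _ hr
    simp [pvPassOuter] at h
    exact h.1 ▸ hr
  | cons u us ih =>
    intro r ch r' ch' h hus hr
    simp only [pvPassOuter] at h
    rcases hR : pvRelaxEdges sk t u (pvNbrs adj u) r ch with ⟨r₁, ch₁⟩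
    rw [hR] at h
    refine ih r₁ ch₁ r' ch' h (fun x hx => hus x (List.mem_cons_of_mem _ hx)) ?_
    exact pvRelaxEdges_sound adj sk t st u (hus u List.mem_cons_self) _ r ch r₁ ch₁ hR
      (fun x hx => hx) hr

-- a pass that reports no change certifies closedness
theorem pvRelaxEdges_fix (sk : String × String) (t u : String) :
    ∀ (ws r : List String) (ch : Bool) (r' : List String),
      pvRelaxEdges sk t u ws r ch = (r', false) →
      ∀ w ∈ ws, (u, w) ≠ sk → w = t ∨ w ∈ r := by
  intro ws
  induction ws with
  | nil => intro r ch r' _ w hw; simp at hw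
  | cons w ws ih =>
    intro r ch r' h x hx hne
    simp only [pvRelaxEdges] at h
    split_ifs at h with h1
    · rcases List.mem_cons.mp hx with h' | h'
      · subst h'
        rcases h1 with h1 | h1 | h1
        · exact absurd h1 hne
        · exact Or.inl h1
        · exact Or.inr h1
      · exact ih r ch r' h x h' hne
    · exfalso
      have := (pvRelaxEdges_inv sk t u (fun _ => True) ws _ true r' false h).2.2.2.1 rfl
      simp at this

theorem pvPassOuter_fix (adj : List (String × List String)) (sk : String × String) (t : String) :
    ∀ (us r : List String) (ch : Bool) (r' : List String),
      pvPassOuter adj sk t us r ch = (r', false) →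
      ∀ u ∈ us, ∀ w ∈ pvNbrs adj u, (u, w) ≠ sk → w = t ∨ w ∈ r := by
  intro us
  induction us with
  | nil => intro r ch r' _ u hu; simp at hu
  | cons u us ih =>
    intro r ch r' h v hv w hw hne
    simp only [pvPassOuter] at h
    rcases hR : pvRelaxEdges sk t u (pvNbrs adj u) r ch with ⟨r₁, ch₁⟩
    rw [hR] at h
    have hch₁ : ch₁ = false := by
      obtain ⟨_, _, _, d2, _, _⟩ := pvPassOuter_inv adj sk t (fun _ => True) (fun _ _ _ => trivial)
        us r₁ ch₁ r' false h
      exact (d2 rfl).2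
    subst hch₁
    have hr₁ : r₁ = r :=
      ((pvRelaxEdges_inv sk t u (fun _ => True) (pvNbrs adj u) r ch r₁ false hR).2.2.2.1 rfl).1
    rcases List.mem_cons.mp hv with h' | h'
    · subst h'
      exact pvRelaxEdges_fix sk t v _ r ch r₁ hR w hw hne
    · exact hr₁ ▸ ih r₁ false r' h v h' w hw hne

-- saturation result: superset of the start state, all reachable, closed
theorem pvSaturate_spec (adj : List (String × List String)) (sk : String × String) (t st : String) :
    ∀ (reach : List String) (hnd : reach.Nodup) (hsub : ∀ x ∈ reach, x ∈ pvUniv adj st),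
      (∀ x ∈ reach, x ∈ pvSaturate adj sk t st reach hnd hsub) ∧
      ((∀ x ∈ reach, pvReach adj sk t st x) →
        ∀ x ∈ pvSaturate adj sk t st reach hnd hsub, pvReach adj sk t st x) ∧
      (∀ u ∈ pvSaturate adj sk t st reach hnd hsub, ∀ w ∈ pvNbrs adj u, (u, w) ≠ sk →
        w = t ∨ w ∈ pvSaturate adj sk t st reach hnd hsub) := by
  intro reach hnd hsub
  induction reach, hnd, hsub using pvSaturate.induct adj sk t st with
  | case1 reach hnd hsub r' h =>
    have hr' : r' = reach :=
      ((pvPassOuter_inv adj sk t (fun _ => True) (fun _ _ _ => trivial)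
        reach reach false r' false h).2.2.2.1 rfl).1
    have hunf : pvSaturate adj sk t st reach hnd hsub = r' := by
      rw [pvSaturate]
      split
      case _ r'' heq => rw [h] at heq; injection heq with h1 h2; exact h1.symm
      case _ r'' heq => rw [h] at heq; injection heq with h1 h2; cases h2
    rw [hunf, hr']
    refine ⟨fun x hx => hx, fun h' => h', ?_⟩
    intro u hu w hw hne
    exact pvPassOuter_fix adj sk t reach reach false r' h u hu w hw hne
  | case2 reach hnd hsub r' h ih =>
    have hunf : pvSaturate adj sk t st reach hnd hsub =
        pvSaturate adj sk t st r'
          ((pvPassOuter_inv adj sk t (· ∈ pvUniv adj st) (pvNbrs_subset_univ adj st)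
              reach reach false r' true h).2.1 hnd)
          (fun x hx => (pvPassOuter_inv adj sk t (· ∈ pvUniv adj st) (pvNbrs_subset_univ adj st)
              reach reach false r' true h).2.2.1 hsub x hx) := by
      rw [pvSaturate]
      split
      case _ r'' heq => rw [h] at heq; injection heq with h1 h2; cases h2
      case _ r'' heq =>
        rw [h] at heq
        injection heq with h1 h2
        subst h1
        rfl
    rw [hunf]
    obtain ⟨i1, i2, i3⟩ := ih
    obtain ⟨a, _, _, _, _, _⟩ := pvPassOuter_inv adj sk t (fun _ => True) (fun _ _ _ => trivial)
      reach reach false r' true h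
    refine ⟨fun x hx => i1 x (a x hx), ?_, i3⟩
    intro hr x hx
    refine i2 ?_ x hx
    exact pvPassOuter_sound adj sk t st reach reach false r' true h hr hr

theorem hasB_iff_hit (adj : List (String × List String)) (sk : String × String) (t st : String) :
    has_alternate_path_py_alt adj st t sk = true ↔ pvHit adj sk t st := by
  unfold has_alternate_path_py_alt
  obtain ⟨s1, s2, s3⟩ := pvSaturate_spec adj sk t st (PySem.Set.ofList [st])
    (PySem.Set.nodup_ofList _) (pvStart_mem_univ adj st)
  have hbase : ∀ x ∈ PySem.Set.ofList [st], pvReach adj sk t st x := by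
    intro x hx
    rw [PySem.Set.mem_ofList] at hx
    simp at hx
    subst hx
    exact pvReach.base
  constructor
  · intro h
    unfold pvHasTargetEdge at h
    simp only [List.any_eq_true, Bool.and_eq_true, beq_iff_eq, Bool.not_eq_true',
      decide_eq_false_iff_not] at h
    obtain ⟨u, hu, w, hw, hwt, hne⟩ := h
    subst hwt
    exact ⟨u, s2 hbase u hu, hw, hne⟩
  · rintro ⟨u, hu, he⟩
    have humem : u ∈ pvSaturate adj sk t st (PySem.Set.ofList [st]) (PySem.Set.nodup_ofList _)
        (pvStart_mem_univ adj st) := by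
      clear he
      induction hu with
      | base =>
        refine s1 st ?_
        rw [PySem.Set.mem_ofList]
        simp
      | step hu' he' hw ih =>
        rcases s3 _ ih _ he'.1 he'.2 with h' | h'
        · exact absurd h' hw
        · exact h'
    unfold pvHasTargetEdge
    simp only [List.any_eq_true, Bool.and_eq_true, beq_iff_eq, Bool.not_eq_true',
      decide_eq_false_iff_not]
    exact ⟨u, humem, t, he.1, rfl, he.2⟩

-- ===== VERDICT (by name: the statement is the Claim_ definition above) =====
theorem has_alternate_path_py_spec : Claim_equal_has_alternate_path_py := by
  intro adj start target skip_edge _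
  unfold Spec_has_alternate_path_py
  have hA := hasA_iff_hit adj skip_edge target start
  have hB := hasB_iff_hit adj skip_edge target start
  cases hA' : has_alternate_path_py adj start target skip_edge <;>
    cases hB' : has_alternate_path_py_alt adj start target skip_edge <;> simp_all
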